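-- pv_equiv track=rewrite | github.com/Yanggorithm/Study | 이태성/weekend/[24]01.08-01.14/프로그래머스 Lv.2 짝지어 제거하기.py | solution
-- ===== SOURCE A (Python) =====
-- def solution(s):
--     stack = []
--     for idx in range(len(s)):
--         alpha = s[idx]
--         if stack:
--             last = stack[-1]
--             if last == alpha:
--                 stack.pop()
--             else:
--                 stack.append(alpha)
--         else:
--             stack.append(alpha)
--     if stack:
--         return 0
--     return 1
-- ===== SOURCE B (Python) =====
-- def solution(s):
--     chars = list(s)
--     while True:
--         removed = False
--         for i in range(len(chars) - 1):
--             if chars[i] == chars[i + 1]: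
--                 del chars[i:i + 2]
--                 removed = True
--                 break
--         if not removed:
--             break
--     return 1 if not chars else 0
-- ===== Notes on version B (the rewrite author's own statement) =====
-- stated objective: alternative
-- what changed: replaces the single left-to-right stack pass with repeated fixed-point rewriting: scan for the first adjacent equal pair, delete it, and restart the scan until no pair remains, then test emptiness
import Mathlib
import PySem

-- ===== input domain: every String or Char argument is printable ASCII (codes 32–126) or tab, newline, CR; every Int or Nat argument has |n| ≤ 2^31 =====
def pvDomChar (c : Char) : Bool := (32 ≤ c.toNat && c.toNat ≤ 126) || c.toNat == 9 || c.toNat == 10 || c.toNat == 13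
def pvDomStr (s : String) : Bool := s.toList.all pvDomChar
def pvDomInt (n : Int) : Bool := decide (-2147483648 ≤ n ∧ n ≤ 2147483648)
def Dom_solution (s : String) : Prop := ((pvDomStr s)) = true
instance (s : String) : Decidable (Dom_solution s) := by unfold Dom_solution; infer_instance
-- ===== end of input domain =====

-- B replaces A's single stack pass with repeated first-adjacent-pair deletion to a fixed point; alternative decomposition, same return value.


-- ===== PORT A =====
-- one loop step: stack[-1] == alpha → pop, else append (Python list end = Lean list end)
def pvStep (stack : List Char) (alpha : Char) : List Char :=
  match stack.getLast? with
  | some last => if last == alpha then stack.dropLast else stack ++ [alpha]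
  | none => stack ++ [alpha]

def solution (s : String) : Int :=
  let stack := s.toList.foldl pvStep []
  match stack with
  | [] => 1
  | _ => 0

-- ===== PORT B =====
-- delete the first adjacent equal pair (none = no pair found in the pass)
def pvRemovePair : List Char → Option (List Char)
  | [] => none
  | [_] => none
  | a :: b :: t => if a == b then some t else (pvRemovePair (b :: t)).map (a :: ·)

theorem pvRemovePair_length : ∀ (l l' : List Char), pvRemovePair l = some l' → l'.length < l.length := by
  intro l
  induction l with
  | nil => intro l' h; simp [pvRemovePair] at h
  | cons a t ih =>
    intro l' h
    match t with
    | [] => simp [pvRemovePair] at h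
    | b :: t' =>
      simp only [pvRemovePair] at h
      split at h
      · cases h; simp
      · rcases Option.map_eq_some_iff.mp h with ⟨m, hm, rfl⟩
        have := ih m hm
        simp only [List.length_cons] at *
        omega

-- repeat until no pair remains
def pvReduce (l : List Char) : List Char :=
  match h : pvRemovePair l with
  | some l' => pvReduce l'
  | none => l
termination_by l.length
decreasing_by exact pvRemovePair_length _ _ h

def solution_alt (s : String) : Int :=
  if (pvReduce s.toList).isEmpty then 1 else 0

-- ===== PRECONDITION & SPEC =====
def Spec_solution (s : String) (out : Int) : Prop := out = solution_alt s
instance (s : String) (out : Int) : Decidable (Spec_solution s out) := by unfold Spec_solution; infer_instance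

-- ===== CLAIM (what is proved, stated in full; the proofs are below) =====
def Claim_equal_solution : Prop := ∀ (s : String), Dom_solution s → Spec_solution s (solution s)

-- ===== LEMMAS AND PROOFS =====

theorem chain_last_ne {u : List Char} {y a : Char}
    (h : (u ++ [y, a]).IsChain (· ≠ ·)) : y ≠ a :=
  (List.isChain_append_cons_cons.mp h).2.1

theorem pvStep_concat_pop (u : List Char) (x : Char) :
    pvStep (u ++ [x]) x = u := by
  simp [pvStep, List.getLast?_concat]

theorem pvStep_push (u : List Char) {x a : Char} (hx : x ≠ a) :
    pvStep (u ++ [x]) a = (u ++ [x]) ++ [a] := by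
  simp [pvStep, List.getLast?_concat, hx]

theorem pvStep_chain {T : List Char} (a : Char)
    (h : T.IsChain (· ≠ ·)) : (pvStep T a).IsChain (· ≠ ·) := by
  rcases List.eq_nil_or_concat T with rfl | ⟨u, x, rfl⟩
  · simpa [pvStep] using List.isChain_singleton a
  · simp only [List.concat_eq_append] at h ⊢
    by_cases hx : x = a
    · subst hx
      rw [pvStep_concat_pop]
      exact (List.isChain_append.mp h).1
    · rw [pvStep_push u hx, List.isChain_append]
      refine ⟨h, List.isChain_singleton a, ?_⟩
      intro p hp q hq
      simp [List.getLast?_concat] at hp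
      simp at hq
      subst hp; subst hq; exact hx

theorem foldl_chain (l : List Char) : ∀ (T : List Char), T.IsChain (· ≠ ·) →
    (l.foldl pvStep T).IsChain (· ≠ ·) := by
  induction l with
  | nil => intro T h; simpa using h
  | cons a t ih => intro T h; exact ih _ (pvStep_chain a h)

theorem pvStep_pvStep {T : List Char} (a : Char)
    (h : T.IsChain (· ≠ ·)) : pvStep (pvStep T a) a = T := by
  rcases List.eq_nil_or_concat T with rfl | ⟨u, x, rfl⟩
  · show pvStep (pvStep [] a) a = []
    simp [pvStep]
  · simp only [List.concat_eq_append] at h ⊢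
    by_cases hx : x = a
    · subst hx
      rw [pvStep_concat_pop]
      rcases List.eq_nil_or_concat u with rfl | ⟨u', y, rfl⟩
      · simp [pvStep]
      · simp only [List.concat_eq_append] at h ⊢
        have hy : y ≠ x := chain_last_ne (by simpa using h)
        rw [pvStep_push u' hy]
    · rw [pvStep_push u hx, pvStep_concat_pop]

-- removing an adjacent equal pair does not change the stack result
theorem foldl_remove_pair (u v : List Char) (a : Char) {T : List Char}
    (h : T.IsChain (· ≠ ·)) :
    (u ++ a :: a :: v).foldl pvStep T = (u ++ v).foldl pvStep T := by
  rw [List.foldl_append, List.foldl_append]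
  simp only [List.foldl_cons]
  rw [pvStep_pvStep a (foldl_chain u T h)]

-- on a pair-free list the stack just accumulates the input
theorem foldl_no_pair : ∀ (l T : List Char), (T ++ l).IsChain (· ≠ ·) →
    l.foldl pvStep T = T ++ l := by
  intro l
  induction l with
  | nil => intro T _; simp
  | cons a t ih =>
    intro T h
    have hstep : pvStep T a = T ++ [a] := by
      rcases List.eq_nil_or_concat T with rfl | ⟨u, x, rfl⟩
      · simp [pvStep]
      · simp only [List.concat_eq_append]
        have h' : (u ++ x :: a :: t).IsChain (· ≠ ·) := by simpa using h
        exact pvStep_push u (List.isChain_append_cons_cons.mp h').2.1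
    simp only [List.foldl_cons, hstep]
    have := ih (T ++ [a]) (by simpa using h)
    simpa using this

theorem pvRemovePair_none_chain : ∀ (l : List Char), pvRemovePair l = none →
    l.IsChain (· ≠ ·) := by
  intro l
  induction l with
  | nil => exact fun _ => .nil
  | cons a t ih =>
    intro h
    cases t with
    | nil => exact .singleton _
    | cons b t2 =>
      simp only [pvRemovePair] at h
      split at h
      · exact absurd h (by simp)
      · rename_i hab
        rw [Option.map_eq_none_iff] at h
        exact List.isChain_cons_cons.mpr ⟨by simpa using hab, ih h⟩

theorem pvRemovePair_some_spec : ∀ (l l' : List Char), pvRemovePair l = some l' →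
    ∃ u a v, l = u ++ a :: a :: v ∧ l' = u ++ v := by
  intro l
  induction l with
  | nil => intro l' h; simp [pvRemovePair] at h
  | cons a t ih =>
    intro l' h
    cases t with
    | nil => simp [pvRemovePair] at h
    | cons b t2 =>
      simp only [pvRemovePair] at h
      split at h
      · rename_i hab
        injection h with h2
        subst h2
        exact ⟨[], a, t2, by simp [show a = b from beq_iff_eq.mp hab], by simp⟩
      · rcases Option.map_eq_some_iff.mp h with ⟨m, hm, rfl⟩
        rcases ih m hm with ⟨u, c, v, h1, h2⟩
        exact ⟨a :: u, c, v, by simp [h1], by simp [h2]⟩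

-- the stack result IS the fixed point of pair removal
theorem foldl_eq_pvReduce (l : List Char) : l.foldl pvStep [] = pvReduce l := by
  induction hn : l.length using Nat.strong_induction_on generalizing l with
  | _ n ih =>
  rw [pvReduce]
  split
  · rename_i l' h
    rcases pvRemovePair_some_spec l l' h with ⟨u, a, v, rfl, rfl⟩
    rw [foldl_remove_pair u v a .nil]
    exact ih (u ++ v).length (by subst hn; exact pvRemovePair_length _ _ h) _ rfl
  · rename_i h
    have := foldl_no_pair l [] (by simpa using pvRemovePair_none_chain l h)
    simpa using this

-- ===== VERDICT (by name: the statement is the Claim_ definition above) =====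
theorem solution_spec : Claim_equal_solution := by
  intro s _
  unfold Spec_solution solution solution_alt
  rw [foldl_eq_pvReduce]
  cases pvReduce s.toList <;> simp
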